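-- pv_equiv track=rewrite | github.com/Twiggecode/Integer-Sequences | Farey Sequence Denominators/Farey_Sequence_Denominator.py | farey_sequence
-- ===== SOURCE A (Python) =====
-- def farey_sequence(n):
--     l=[]
--     for i in range(1,n+1):
--         (a, b, c, d) = (0, 1, 1, i) #here a/b is first term and c/d is consecutive term
--         l.append(1) #first farey seq. denominator will always be 1
--
--         #following is the logic of next term in farey seq
--         while (c <= i):
--             k = (i + b) // d
--             (a, b, c, d) = (c, d, k * c - a, k * d - b)
--             l.append(b) #appending only the denominator, here its b
--     return l[:n]
-- ===== SOURCE B (Python) =====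
-- def farey_sequence(n):
--     # Stern-Brocot mediant recursion per order, stopping as soon as n
--     # denominators have been produced (each order's full list starts and
--     # ends with denominator 1 for 0/1 and 1/1).
--     def between(a, b, c, d, i, out):
--         # denominators of the reduced fractions strictly between a/b and c/d
--         # in the Farey sequence of order i (a/b, c/d Farey neighbours)
--         if b + d <= i:
--             between(a, b, a + c, b + d, i, out)
--             out.append(b + d)
--             between(a + c, b + d, c, d, i, out)
--
--     l = []
--     i = 1
--     while len(l) < n:
--         l.append(1)
--         between(0, 1, 1, 1, i, l)
--         l.append(1)
--         i += 1
--     return l[:n]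
-- ===== Notes on version B (the rewrite author's own statement) =====
-- stated objective: faster
-- what changed: Replaces the neighbour-walk (next-term formula k=(i+b)//d iterated over all n orders, then slicing) by a Stern-Brocot mediant recursion that emits each order's denominators recursively, and stops generating orders as soon as n denominators exist instead of building all n orders and truncating.
import Mathlib
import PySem

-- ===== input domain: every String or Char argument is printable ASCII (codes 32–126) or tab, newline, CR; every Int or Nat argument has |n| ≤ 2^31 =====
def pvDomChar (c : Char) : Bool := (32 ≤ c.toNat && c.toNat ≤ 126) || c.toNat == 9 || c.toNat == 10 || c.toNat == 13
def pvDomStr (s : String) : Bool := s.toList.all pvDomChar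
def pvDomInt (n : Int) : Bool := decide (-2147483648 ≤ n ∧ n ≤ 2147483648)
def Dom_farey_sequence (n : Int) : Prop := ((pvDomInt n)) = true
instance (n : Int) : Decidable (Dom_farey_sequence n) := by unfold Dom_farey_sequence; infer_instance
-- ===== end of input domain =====

-- B replaces A's order-by-order neighbour walk by a Stern-Brocot mediant recursion and
-- stops generating orders as soon as n denominators exist (measured faster by the check).

-- ===== PORT A =====
-- A's inner while-loop: state (a,b,c,d); 'while c <= i: k=(i+b)//d; step; append new b'.
-- Appending the new b after the step is appending the old d before it. The growing list l
-- is threaded through as an accumulator, kept in reverse (append = cons) and reversed once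
-- at the end; the Nat fuel only makes the loop total and is proved sufficient below.
def fareyWalk : Nat → Int → Int → Int → Int → Int → List Int → List Int
  | 0, _, _, _, _, _, l => l
  | fuel+1, i, a, b, c, d, l =>
    if c ≤ i then
      fareyWalk fuel i c d
        (PySem.Int.floordiv (i + b) d * c - a) (PySem.Int.floordiv (i + b) d * d - b)
        (d :: l)
    else l

def farey_sequence (n : Int) : List Int :=
  PySem.List.slice
    (((PySem.List.pyRange 1 (n + 1) 1).foldl
        (fun l i => fareyWalk (2 ^ (i.toNat + 2)) i 0 1 1 i (1 :: l)) []).reverse)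
    none (some n)

-- ===== PORT B =====
-- Source B's 'between': denominators of fractions strictly between neighbours a/b and c/d in
-- the Farey sequence of order i; the fuel (recursion depth ≤ i) only makes it total.
def fareyMediants : Nat → Int → Int → Int → Int → Int → List Int
  | 0, _, _, _, _, _ => []
  | fuel+1, i, a, b, c, d =>
    if b + d ≤ i then
      fareyMediants fuel i a b (a + c) (b + d)
        ++ (b + d) :: fareyMediants fuel i (a + c) (b + d) c d
    else []

-- Source B's 'while len(l) < n' loop (each iteration appends ≥ 2 elements, so n+1 fuel suffices)
def fareyLoop : Nat → Int → Int → List Int → List Int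
  | 0, _, _, l => l
  | fuel+1, n, i, l =>
    if (l.length : Int) < n then
      fareyLoop fuel n (i + 1) (l ++ 1 :: fareyMediants (i.toNat + 1) i 0 1 1 1 ++ [1])
    else l

def farey_sequence_alt (n : Int) : List Int :=
  PySem.List.slice (fareyLoop (n.toNat + 1) n 1 []) none (some n)

-- ===== PRECONDITION & SPEC =====
def Spec_farey_sequence (n : Int) (out : List Int) : Prop := out = farey_sequence_alt n
instance (n : Int) (out : List Int) : Decidable (Spec_farey_sequence n out) := by unfold Spec_farey_sequence; infer_instance

-- ===== CLAIM (what is proved, stated in full; the proofs are below) =====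
def Claim_equal_farey_sequence : Prop := ∀ (n : Int), Dom_farey_sequence n → Spec_farey_sequence n (farey_sequence n)

-- ===== LEMMAS AND PROOFS =====

-- the walk of port A as a pure list (same loop, emitting instead of accumulating)
def walkP : Nat → Int → Int → Int → Int → Int → List Int
  | 0, _, _, _, _, _ => []
  | fuel+1, i, a, b, c, d =>
    if c ≤ i then
      d :: walkP fuel i c d
        (PySem.Int.floordiv (i + b) d * c - a) (PySem.Int.floordiv (i + b) d * d - b)
    else []

-- the accumulator form of the port computes the pure walk, reversed onto the accumulator
theorem fareyWalk_acc : ∀ (fuel : Nat) (i a b c d : Int) (l : List Int),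
    fareyWalk fuel i a b c d l = (walkP fuel i a b c d).reverse ++ l := by
  intro fuel
  induction fuel with
  | zero => intro i a b c d l; simp [fareyWalk, walkP]
  | succ fuel ih =>
    intro i a b c d l
    by_cases h : c ≤ i
    · simp only [fareyWalk, walkP, if_pos h, ih]
      simp
    · simp [fareyWalk, walkP, if_neg h]

-- canonical mediant list: fuel i.toNat+2 is always enough (see med_fuel)
def Cmed (i a b c d : Int) : List Int := fareyMediants (i.toNat + 2) i a b c d

-- one full order: denominators of 0/1, the interior fractions, and 1/1
def ord (i : Int) : List Int := 1 :: Cmed i 0 1 1 1 ++ [1]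

-- all orders 1..j concatenated
def ords (j : Int) : List Int := (PySem.List.pyRange 1 (j + 1) 1).flatMap ord

theorem fareyMediants_succ (f : Nat) (i a b c d : Int) :
    fareyMediants (f + 1) i a b c d
      = if b + d ≤ i then
          fareyMediants f i a b (a + c) (b + d) ++ (b + d) :: fareyMediants f i (a + c) (b + d) c d
        else [] := rfl

theorem walkP_succ (f : Nat) (i a b c d : Int) :
    walkP (f + 1) i a b c d
      = if c ≤ i then
          d :: walkP f i c d
            (PySem.Int.floordiv (i + b) d * c - a) (PySem.Int.floordiv (i + b) d * d - b)
        else [] := rfl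

-- fuel irrelevance for fareyMediants once it covers the recursion depth
theorem med_fuel : ∀ (f g : Nat) (i a b c d : Int), 1 ≤ b → 1 ≤ d →
    (i + 2 - (b + d)).toNat ≤ f → (i + 2 - (b + d)).toNat ≤ g →
    fareyMediants f i a b c d = fareyMediants g i a b c d := by
  intro f
  induction f with
  | zero =>
    intro g i a b c d hb hd hf hg
    have h : ¬ b + d ≤ i := by omega
    cases g with
    | zero => rfl
    | succ g => simp [fareyMediants, h]
  | succ f ih =>
    intro g i a b c d hb hd hf hg
    by_cases h : b + d ≤ i
    · cases g with
      | zero => omega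
      | succ g =>
        simp only [fareyMediants, if_pos h]
        rw [ih g i a b (a + c) (b + d) hb (by omega) (by omega) (by omega),
            ih g i (a + c) (b + d) c d (by omega) hd (by omega) (by omega)]
    · cases g with
      | zero => simp [fareyMediants, h]
      | succ g => simp [fareyMediants, h]

theorem med_len : ∀ (f : Nat) (i a b c d : Int),
    (fareyMediants f i a b c d).length + 1 ≤ 2 ^ f := by
  intro f
  induction f with
  | zero => intro i a b c d; simp [fareyMediants]
  | succ f ih =>
    intro i a b c d
    by_cases h : b + d ≤ i
    · have h1 := ih i a b (a + c) (b + d)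
      have h2 := ih i (a + c) (b + d) c d
      simp only [fareyMediants, if_pos h, List.length_append, List.length_cons]
      have : 2 ^ (f + 1) = 2 ^ f + 2 ^ f := by ring
      omega
    · simp only [fareyMediants, if_neg h, List.length_nil]
      have : 0 < 2 ^ (f + 1) := Nat.pow_pos (by omega : 0 < 2)
      omega

theorem Cmed_nil (i a b c d : Int) (h : ¬ b + d ≤ i) : Cmed i a b c d = [] := by
  simp [Cmed, fareyMediants, h]

theorem Cmed_unfold (i a b c d : Int) (hb : 1 ≤ b) (hd : 1 ≤ d) (h : b + d ≤ i) :
    Cmed i a b c d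
      = Cmed i a b (a + c) (b + d) ++ (b + d) :: Cmed i (a + c) (b + d) c d := by
  have hi : (0:Int) < i := by omega
  show fareyMediants (i.toNat + 1 + 1) i a b c d = _
  rw [fareyMediants_succ, if_pos h]
  rw [med_fuel (i.toNat + 1) (i.toNat + 2) i a b (a + c) (b + d) hb (by omega)
        (by omega) (by omega),
      med_fuel (i.toNat + 1) (i.toNat + 2) i (a + c) (b + d) c d (by omega) hd
        (by omega) (by omega)]
  rfl

-- the next-term formula computes the unique Farey successor, for ANY Bezout witness (p,q)
theorem farey_next (i a b c d p q : Int) (hb : 1 ≤ b) (hd : 1 ≤ d) (hdi : d ≤ i)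
    (hadj : i < b + d) (hcross : b * c - a * d = 1) (hpq : q * a - p * b = 1) :
    PySem.Int.floordiv (i + q) b * a - p = c ∧
    PySem.Int.floordiv (i + q) b * b - q = d := by
  have hb0 : (0:Int) < b := by omega
  have hk := PySem.Int.floordiv_mul_add_mod (i + q) b
  have hr0 := PySem.Int.mod_nonneg (i + q) hb0
  have hrb := PySem.Int.mod_lt (i + q) hb0
  set k := PySem.Int.floordiv (i + q) b with hkdef
  -- the computed pair satisfies the same Bezout identity as (c, d)
  have h1 : b * (k * a - p) - a * (k * b - q) = 1 := by linear_combination hpq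
  -- b divides d + q
  have hco : IsCoprime b a := ⟨c, -d, by linear_combination hcross⟩
  have hdvd : b ∣ a * (d + q) := ⟨c + p, by linear_combination hpq - hcross⟩
  obtain ⟨t, ht⟩ := hco.dvd_of_dvd_mul_left hdvd
  -- both k*b - q and d lie in the half-open window (i - b, i], and are congruent mod b
  have hwin : i - b < k * b - q ∧ k * b - q ≤ i := by omega
  have hdiff : (k * b - q) - d = b * (k - t) := by linear_combination -ht
  have hlow : i - b < d := by omega
  have hkt : k = t := by
    rcases lt_trichotomy k t with hlt | heq | hgt
    · exfalso
      have hm : b * (k - t) ≤ b * (-1) := mul_le_mul_of_nonneg_left (by omega) (by omega)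
      linarith [hwin.1]
    · exact heq
    · exfalso
      have hm : b * 1 ≤ b * (k - t) := mul_le_mul_of_nonneg_left (by omega) (by omega)
      linarith [hwin.2]
  have hz : b * (k - t) = 0 := by rw [hkt]; ring
  have hfd : k * b - q = d := by linarith [hdiff, hz]
  refine ⟨?_, hfd⟩
  have h2 : b * (k * a - p) = b * c := by
    rw [hfd] at h1
    linear_combination h1 - hcross
  exact mul_left_cancel₀ (by omega) h2

-- once the pending numerator is i+1, the walk emits nothing more
theorem walk_dead (f : Nat) (i x y z : Int) : walkP f i x y (i + 1) z = [] := by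
  cases f with
  | zero => rfl
  | succ f => simp [walkP]

-- MAIN: the walk through the interval (a/b, c/d) emits exactly the mediant list,
-- then continues from some Bezout predecessor (P,Q) of c/d
theorem walk_med : ∀ (g : Nat) (i a b c d p q : Int),
    (i + 1 - (b + d)).toNat ≤ g →
    b * c - a * d = 1 → 0 ≤ a → a < b → 0 < c → c ≤ d → b ≤ i → d ≤ i →
    q * a - p * b = 1 →
    ∃ P Q : Int, Q * c - P * d = 1 ∧
      ∀ fuel : Nat,
        walkP ((Cmed i a b c d).length + fuel) i a b
          (PySem.Int.floordiv (i + q) b * a - p) (PySem.Int.floordiv (i + q) b * b - q)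
        = Cmed i a b c d ++ walkP fuel i P Q c d := by
  intro g
  induction g with
  | zero =>
    intro i a b c d p q hg hcross ha hab hc hcd hbi hdi hpq
    refine ⟨a, b, hcross, ?_⟩
    intro fuel
    rw [Cmed_nil i a b c d (by omega)]
    obtain ⟨he, hf⟩ :=
      farey_next i a b c d p q (by omega) (by omega) hdi (by omega) hcross hpq
    rw [he, hf]
    simp
  | succ g ih =>
    intro i a b c d p q hg hcross ha hab hc hcd hbi hdi hpq
    by_cases hadj : b + d ≤ i
    · have hb1 : (1:Int) ≤ b := by omega
      have hd1 : (1:Int) ≤ d := by omega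
      obtain ⟨P₁, Q₁, hPQ₁, hW₁⟩ :=
        ih i a b (a + c) (b + d) p q (by omega) (by linear_combination hcross)
          ha hab (by omega) (by omega) hbi (by omega) hpq
      obtain ⟨P, Q, hPQ, hW₂⟩ :=
        ih i (a + c) (b + d) c d P₁ Q₁ (by omega) (by linear_combination hcross)
          (by omega) (by omega) hc hcd (by omega) hdi hPQ₁
      refine ⟨P, Q, hPQ, ?_⟩
      intro fuel
      rw [Cmed_unfold i a b c d hb1 hd1 hadj]
      rw [show (Cmed i a b (a + c) (b + d) ++ (b + d) :: Cmed i (a + c) (b + d) c d).length + fuel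
            = (Cmed i a b (a + c) (b + d)).length
              + (((Cmed i (a + c) (b + d) c d).length + fuel) + 1) from by
        simp; omega]
      rw [hW₁ (((Cmed i (a + c) (b + d) c d).length + fuel) + 1)]
      rw [walkP_succ, if_pos (show a + c ≤ i by omega)]
      rw [hW₂ fuel]
      simp
    · refine ⟨a, b, hcross, ?_⟩
      intro fuel
      rw [Cmed_nil i a b c d hadj]
      obtain ⟨he, hf⟩ :=
        farey_next i a b c d p q (by omega) (by omega) hdi (by omega) hcross hpq
      rw [he, hf]
      simp

-- one whole order: A's walk for order i is the mediant list followed by the final 1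
theorem order_eq (i : Int) (hi : 1 ≤ i) :
    walkP (2 ^ (i.toNat + 2)) i 0 1 1 i = Cmed i 0 1 1 1 ++ [1] := by
  obtain ⟨P, Q, hPQ, hW⟩ :=
    walk_med (i - 1).toNat i 0 1 1 1 (-1) 1 (by omega) (by norm_num) (by norm_num)
      (by norm_num) (by norm_num) (by norm_num) hi hi (by norm_num)
  have hd1 : ∀ x : Int, PySem.Int.floordiv x 1 = x := fun x => by
    rw [PySem.Int.floordiv_eq_ediv_of_pos (by norm_num)]
    exact Int.ediv_one x
  have hlen : (Cmed i 0 1 1 1).length + 1 ≤ 2 ^ (i.toNat + 2) :=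
    med_len (i.toNat + 2) i 0 1 1 1
  obtain ⟨k, hk⟩ : ∃ k, 2 ^ (i.toNat + 2) = (Cmed i 0 1 1 1).length + (k + 1) :=
    ⟨2 ^ (i.toNat + 2) - (Cmed i 0 1 1 1).length - 1, by omega⟩
  have hWs := hW (k + 1)
  rw [hd1] at hWs
  rw [show (i + 1) * 0 - (-1) = (1:Int) from by ring,
      show (i + 1) * 1 - 1 = i from by ring] at hWs
  rw [walkP_succ, if_pos hi, hd1,
      show (i + Q) * 1 - P = i + 1 from by linarith, walk_dead] at hWs
  rw [hk]
  exact hWs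

theorem chunk_B (i : Int) (hi : 1 ≤ i) :
    fareyMediants (i.toNat + 1) i 0 1 1 1 = Cmed i 0 1 1 1 := by
  exact med_fuel (i.toNat + 1) (i.toNat + 2) i 0 1 1 1 (by omega) (by omega)
    (by omega) (by omega)

theorem fareyLoop_succ (f : Nat) (n i : Int) (l : List Int) :
    fareyLoop (f + 1) n i l
      = if (l.length : Int) < n then
          fareyLoop f n (i + 1) (l ++ 1 :: fareyMediants (i.toNat + 1) i 0 1 1 1 ++ [1])
        else l := rfl

theorem ords_succ (i : Int) (hi : 1 ≤ i) : ords i = ords (i - 1) ++ ord i := by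
  unfold ords
  rw [show i - 1 + 1 = i from by ring,
      PySem.List.pyRange_one_succ_right hi, List.flatMap_append]
  simp

theorem ords_split (i n : Int) (h1 : 1 ≤ i) (h2 : i - 1 ≤ n) :
    ∃ t : List Int, ords n = ords (i - 1) ++ t := by
  have hi := h1
  refine ⟨(PySem.List.pyRange i (n + 1) 1).flatMap ord, ?_⟩
  unfold ords
  rw [show i - 1 + 1 = i from by ring,
      PySem.List.pyRange_one_append 1 i (n + 1) hi (by omega), List.flatMap_append]

theorem ord_len (i : Int) : 2 ≤ (ord i).length := by
  simp [ord]

theorem loop_eq : ∀ (fuel : Nat) (n i : Int), 1 ≤ i → i ≤ n + 1 → 1 ≤ n →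
    n ≤ (ords (i - 1)).length + 2 * fuel →
    2 * (i - 1) ≤ (ords (i - 1)).length →
    (fareyLoop fuel n i (ords (i - 1))).take n.toNat = (ords n).take n.toNat := by
  have stop : ∀ (n i : Int), 1 ≤ i → i ≤ n + 1 → 1 ≤ n →
      (n ≤ ((ords (i - 1)).length : Int)) →
      (ords (i - 1)).take n.toNat = (ords n).take n.toNat := by
    intro n i hi hin hn hge
    obtain ⟨t, ht⟩ := ords_split i n hi (by omega)
    rw [ht, List.take_append_of_le_length (by omega)]
  intro fuel
  induction fuel with
  | zero =>
    intro n i hi hin hn hfuel hlen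
    exact stop n i hi hin hn (by omega)
  | succ fuel ih =>
    intro n i hi hin hn hfuel hlen
    by_cases hcont : ((ords (i - 1)).length : Int) < n
    · rw [fareyLoop_succ, if_pos hcont, chunk_B i hi]
      have hstep : ords (i - 1) ++ 1 :: Cmed i 0 1 1 1 ++ [1] = ords (i + 1 - 1) := by
        rw [show i + 1 - 1 = i from by ring, ords_succ i hi]
        simp [ord]
      have hnl : (ords (i + 1 - 1)).length = (ords (i - 1)).length + (ord i).length := by
        rw [show i + 1 - 1 = i from by ring, ords_succ i hi, List.length_append]
      have h2 := ord_len i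
      rw [hstep]
      exact ih n (i + 1) (by omega) (by omega) hn (by omega) (by omega)
    · rw [fareyLoop_succ, if_neg hcont]
      exact stop n i hi hin hn (by omega)

-- ===== VERDICT (by name: the statement is the Claim_ definition above) =====
theorem ords_zero : ords 0 = [] := by
  unfold ords
  rw [show (0:Int) + 1 = 1 from by ring, PySem.List.pyRange_one_eq_nil le_rfl]
  rfl

theorem farey_sequence_spec : Claim_equal_farey_sequence := by
  intro n _
  unfold Spec_farey_sequence farey_sequence farey_sequence_alt
  by_cases hn : n ≤ 0
  · rw [PySem.List.pyRange_one_eq_nil (by omega : n + 1 ≤ 1),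
        show n.toNat + 1 = 0 + 1 from by omega, fareyLoop_succ,
        if_neg (by simpa using hn)]
    rfl
  · have hn1 : 1 ≤ n := by omega
    have hfold : ∀ (L : List Int) (acc : List Int),
        L.foldl (fun l i => fareyWalk (2 ^ (i.toNat + 2)) i 0 1 1 i (1 :: l)) acc
          = (L.reverse.flatMap
              (fun i => (walkP (2 ^ (i.toNat + 2)) i 0 1 1 i).reverse ++ [1])) ++ acc := by
      intro L
      induction L with
      | nil => intro acc; simp
      | cons x xs ih =>
        intro acc
        rw [List.foldl_cons, ih]
        simp [fareyWalk_acc, List.flatMap_append]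
    rw [hfold, List.append_nil, List.reverse_flatMap, List.reverse_reverse]
    simp only [Function.comp_def]
    have hA : (PySem.List.pyRange 1 (n + 1) 1).flatMap
        (fun i => ((walkP (2 ^ (i.toNat + 2)) i 0 1 1 i).reverse ++ [1]).reverse) = ords n := by
      unfold ords
      rw [List.flatMap_def, List.flatMap_def]
      congr 1
      apply List.map_congr_left
      intro x hx
      have hx1 : 1 ≤ x := ((PySem.List.mem_pyRange_one).mp hx).1
      rw [List.reverse_append, List.reverse_reverse, order_eq x hx1]
      rfl
    rw [hA, PySem.List.slice_to _ (by omega), PySem.List.slice_to _ (by omega)]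
    rw [show ([] : List Int) = ords (1 - 1) from by rw [show (1:Int) - 1 = 0 from rfl, ords_zero]]
    exact (loop_eq (n.toNat + 1) n 1 le_rfl (by omega) hn1 (by simp [ords_zero]; omega)
      (by simp [ords_zero])).symm
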